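-- pv_equiv track=rewrite | github.com/amanimran786/jarvis-ai | messages.py | _dedupe_choice_displays
-- ===== SOURCE A (Python) =====
-- def _dedupe_choice_displays(choices: list[dict[str, str]]) -> list[dict[str, str]]:
--     counts: dict[str, int] = {}
--     for choice in choices:
--         counts[choice["display"]] = counts.get(choice["display"], 0) + 1
--     seen: dict[str, int] = {}
--     for choice in choices:
--         display = choice["display"]
--         if counts[display] <= 1:
--             continue
--         seen[display] = seen.get(display, 0) + 1
--         choice["display"] = f"{display} [contact {seen[display]}]"
--     return choices
-- ===== SOURCE B (Python) =====
-- def _dedupe_choice_displays(choices: list[dict[str, str]]) -> list[dict[str, str]]: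
--     groups: dict[str, list[int]] = {}
--     for idx, choice in enumerate(choices):
--         groups.setdefault(choice["display"], []).append(idx)
--     for name, idxs in groups.items():
--         if len(idxs) > 1:
--             for i, idx in enumerate(idxs, 1):
--                 choices[idx]["display"] = f"{name} [contact {i}]"
--     return choices
-- ===== Notes on version B (the rewrite author's own statement) =====
-- stated objective: alternative
-- what changed: B first builds a grouping index mapping each display name to the list of positions bearing it, then renames within each duplicated group by enumerating its members, instead of A's two flat scans over the choices with running count/seen dicts.
import Mathlib
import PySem

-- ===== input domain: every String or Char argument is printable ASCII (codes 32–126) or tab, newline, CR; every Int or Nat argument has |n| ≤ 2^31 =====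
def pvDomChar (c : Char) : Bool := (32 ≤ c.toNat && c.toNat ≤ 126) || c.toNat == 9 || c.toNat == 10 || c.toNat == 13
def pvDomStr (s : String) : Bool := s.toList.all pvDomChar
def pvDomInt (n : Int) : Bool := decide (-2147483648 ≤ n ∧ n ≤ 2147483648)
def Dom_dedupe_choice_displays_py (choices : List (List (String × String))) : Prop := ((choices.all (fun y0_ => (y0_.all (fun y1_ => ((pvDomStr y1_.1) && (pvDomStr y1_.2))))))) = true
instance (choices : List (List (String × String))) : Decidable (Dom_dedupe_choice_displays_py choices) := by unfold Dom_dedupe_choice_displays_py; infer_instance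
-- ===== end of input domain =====

-- B replaces A's two flat scans with running count/seen dicts by a grouping index
-- (display name -> list of positions) built in one pass, then renames inside each
-- duplicated group (objective: alternative, same cost). Both Pythons mutate the
-- choice dicts in place identically and return the same list object; the theorems
-- below are about the returned value.

-- choice["display"]; under Pre_ the key is present, so the "" default is never taken
def pvDisp (c : List (String × String)) : String :=
  ((PySem.Dict.mk c).get? "display").getD ""

-- ===== PORT A =====
-- body of A's second loop: state = (seen dict, output accumulated so far)
def pvStepA (counts : PySem.Dict String Int)
    (acc : PySem.Dict String Int × List (List (String × String)))
    (c : List (String × String)) :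
    PySem.Dict String Int × List (List (String × String)) :=
  let display := pvDisp c
  if counts.getD display 0 ≤ 1 then (acc.1, acc.2 ++ [c])
  else
    let seen := acc.1.insert display (acc.1.getD display 0 + 1)
    (seen, acc.2 ++ [((PySem.Dict.mk c).insert "display"
        (display ++ " [contact " ++ PySem.Int.toStr (seen.getD display 0) ++ "]")).items])

def dedupe_choice_displays_py (choices : List (List (String × String))) :
    List (List (String × String)) :=
  -- counts[choice["display"]] = counts.get(choice["display"], 0) + 1; the later read
  -- counts[display] always finds the key, so getD 0 is exact there
  let counts : PySem.Dict String Int :=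
    choices.foldl (fun cnt c => cnt.insert (pvDisp c) (cnt.getD (pvDisp c) 0 + 1)) PySem.Dict.empty
  (choices.foldl (pvStepA counts) (PySem.Dict.empty, [])).2

-- ===== PORT B =====
-- inner loop body: choices[idx]["display"] = f"{name} [contact {i}]"  (p = (i, idx) from
-- enumerate(idxs, 1); idx is always a valid index, so the total pyGetD/pySetD are exact)
def pvRenameStep (name : String) (cs : List (List (String × String))) (p : Int × Int) :
    List (List (String × String)) :=
  PySem.List.pySetD cs p.2
    (((PySem.Dict.mk (PySem.List.pyGetD cs p.2 [])).insert "display"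
      (name ++ " [contact " ++ PySem.Int.toStr p.1 ++ "]")).items)

-- one iteration of 'for name, idxs in groups.items()'
def pvApplyGroup (cs : List (List (String × String))) (g : String × List Int) :
    List (List (String × String)) :=
  if 1 < g.2.length then (PySem.List.enumerate g.2 1).foldl (pvRenameStep g.1) cs else cs

def dedupe_choice_displays_py_alt (choices : List (List (String × String))) :
    List (List (String × String)) :=
  -- groups.setdefault(choice["display"], []).append(idx)
  let groups : PySem.Dict String (List Int) :=
    (PySem.List.enumerate choices 0).foldl
      (fun g p => g.modify (pvDisp p.2) [] (· ++ [p.1])) PySem.Dict.empty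
  groups.items.foldl pvApplyGroup choices

-- ===== PRECONDITION & SPEC =====
-- Pre_ excludes exactly the inputs where a choice lacks the "display" key: A raises KeyError there.
def Pre_dedupe_choice_displays_py (choices : List (List (String × String))) : Prop :=
  ∀ c ∈ choices, ((PySem.Dict.mk c).get? "display").isSome = true
instance (choices : List (List (String × String))) : Decidable (Pre_dedupe_choice_displays_py choices) := by unfold Pre_dedupe_choice_displays_py; infer_instance

def pvWitness_dedupe_choice_displays_py : (List (List (String × String))) :=
  [[("display", "Bob")], [("display", "Ann")], [("display", "Bob")]]

def Spec_dedupe_choice_displays_py (choices : List (List (String × String))) (out : List (List (String × String))) : Prop := out = dedupe_choice_displays_py_alt choices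
instance (choices : List (List (String × String))) (out : List (List (String × String))) : Decidable (Spec_dedupe_choice_displays_py choices out) := by unfold Spec_dedupe_choice_displays_py; infer_instance

-- ===== CLAIM (what is proved, stated in full; the proofs are below) =====
def Claim_equal_dedupe_choice_displays_py : Prop := ∀ (choices : List (List (String × String))), Dom_dedupe_choice_displays_py choices → Pre_dedupe_choice_displays_py choices → Spec_dedupe_choice_displays_py choices (dedupe_choice_displays_py choices)

-- ===== LEMMAS AND PROOFS =====

-- the elementwise description both sides are reduced to: at index i the choice keeps its
-- display if it is unique, else gets the suffix numbered by the prefix count plus one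
def pvRename (name : String) (k : Int) (c : List (String × String)) : List (String × String) :=
  ((PySem.Dict.mk c).insert "display" (name ++ " [contact " ++ PySem.Int.toStr k ++ "]")).items

def pvRender (displays : List String) (i : Nat) (c : List (String × String)) :
    List (String × String) :=
  let d := pvDisp c
  if 1 < displays.count d then pvRename d (((displays.take i).count d : Int) + 1) c else c

def pvSpecGo (displays : List String) : Nat → List (List (String × String)) → List (List (String × String))
  | _, [] => []
  | n, c :: t => pvRender displays n c :: pvSpecGo displays (n + 1) t

lemma pvMapIdx_render (displays : List String) :
    ∀ (n : Nat) (l : List (List (String × String))),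
      l.mapIdx (fun i c => pvRender displays (n + i) c) = pvSpecGo displays n l := by
  intro n l
  induction l generalizing n with
  | nil => simp [pvSpecGo]
  | cons c t ih =>
      rw [List.mapIdx_cons]
      have hf : (fun i c => pvRender displays (n + (i + 1)) c)
              = (fun i c => pvRender displays ((n + 1) + i) c) := by
        funext i c; congr 1; omega
      simp only [hf, ih (n + 1), pvSpecGo, Nat.add_zero]

-- ---------- A-side ----------

lemma pvCounts_getD (choices : List (List (String × String))) (d : String) :
    (choices.foldl (fun cnt c => cnt.insert (pvDisp c) (cnt.getD (pvDisp c) 0 + 1))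
        PySem.Dict.empty).getD d 0
      = ((choices.map pvDisp).count d : Int) := by
  rw [show (choices.foldl (fun cnt c => cnt.insert (pvDisp c) (cnt.getD (pvDisp c) 0 + 1))
        (PySem.Dict.empty : PySem.Dict String Int))
      = (choices.map pvDisp).foldl (fun cnt k => cnt.insert k (cnt.getD k 0 + 1)) PySem.Dict.empty
    by exact (List.foldl_map (f := pvDisp)
      (g := fun (cnt : PySem.Dict String Int) (k : String) => cnt.insert k (cnt.getD k 0 + 1))).symm]
  rw [PySem.Dict.getD_foldl_insert_add_one]
  simp

lemma pvFoldA_go (counts : PySem.Dict String Int) (displays : List String)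
    (hc : ∀ d, counts.getD d 0 = (displays.count d : Int)) :
    ∀ (l pre : List (List (String × String))) (seen : PySem.Dict String Int)
      (out : List (List (String × String))),
      displays = (pre ++ l).map pvDisp →
      (∀ d, 1 < displays.count d → seen.getD d 0 = ((pre.map pvDisp).count d : Int)) →
      (l.foldl (pvStepA counts) (seen, out)).2 = out ++ pvSpecGo displays pre.length l := by
  intro l
  induction l with
  | nil => intro pre seen out _ _; simp [pvSpecGo]
  | cons c t ih =>
      intro pre seen out hdisp hseen
      have hcnt : counts.getD (pvDisp c) 0 = (displays.count (pvDisp c) : Int) := hc (pvDisp c)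
      by_cases hle : counts.getD (pvDisp c) 0 ≤ 1
      · -- not a duplicate display: copied unchanged, seen unchanged
        have hnot : ¬ 1 < displays.count (pvDisp c) := by
          rw [hcnt] at hle; exact_mod_cast not_lt.mpr hle
        have hstep : pvStepA counts (seen, out) c = (seen, out ++ [c]) := by
          simp [pvStepA, hle]
        rw [List.foldl_cons, hstep,
            ih (pre ++ [c]) seen (out ++ [c]) (by simpa using hdisp)
              (by
                intro d hd
                have hne : d ≠ pvDisp c := by rintro rfl; exact hnot hd
                have := hseen d hd
                simp [List.count_append, Ne.symm hne, this])]
        simp [pvSpecGo, pvRender, hnot]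
      · -- duplicate display: rename with the running number
        have hgt : 1 < displays.count (pvDisp c) := by
          rw [hcnt] at hle; exact_mod_cast not_le.mp hle
        have hpre : seen.getD (pvDisp c) 0 = ((pre.map pvDisp).count (pvDisp c) : Int) :=
          hseen (pvDisp c) hgt
        have htake : displays.take pre.length = pre.map pvDisp := by
          rw [hdisp, List.map_append]
          rw [show pre.length = (pre.map pvDisp).length by simp]
          exact List.take_left
        have hstep : pvStepA counts (seen, out) c =
            (seen.insert (pvDisp c) (seen.getD (pvDisp c) 0 + 1),
             out ++ [((PySem.Dict.mk c).insert "display"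
               ((pvDisp c) ++ " [contact " ++
                 PySem.Int.toStr (((pre.map pvDisp).count (pvDisp c) : Int) + 1) ++ "]")).items]) := by
          simp [pvStepA, hle, PySem.Dict.getD_insert_self, hpre]
        rw [List.foldl_cons, hstep,
            ih (pre ++ [c]) _ _ (by simpa using hdisp)
              (by
                intro d hd
                by_cases hde : d = pvDisp c
                · subst hde
                  rw [PySem.Dict.getD_insert_self, hpre]
                  simp [List.count_append]
                · rw [PySem.Dict.getD_insert_of_ne _ _ _ hde, hseen d hd]
                  simp [List.count_append, Ne.symm hde])]
        simp [pvSpecGo, pvRender, pvRename, hgt, htake]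

lemma pvA_eq (choices : List (List (String × String))) :
    dedupe_choice_displays_py choices = pvSpecGo (choices.map pvDisp) 0 choices := by
  unfold dedupe_choice_displays_py
  rw [pvFoldA_go _ (choices.map pvDisp) (pvCounts_getD choices) choices [] _ [] (by simp)
      (by intro d _; simp)]
  simp

-- ---------- B-side ----------

-- the index group of a name: positions (as in enumerate) whose choice displays it
def pvI (choices : List (List (String × String))) (d : String) : List Int :=
  (((PySem.List.enumerate choices 0).map (fun p => (pvDisp p.2, p.1))).filter
    (fun q => q.1 == d)).map (·.2)

lemma pvGroups_getD (choices : List (List (String × String))) (d : String) :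
    ((PySem.List.enumerate choices 0).foldl
        (fun g p => g.modify (pvDisp p.2) [] (· ++ [p.1]))
        (PySem.Dict.empty : PySem.Dict String (List Int))).getD d []
      = pvI choices d := by
  rw [show ((PySem.List.enumerate choices 0).foldl
        (fun g p => g.modify (pvDisp p.2) [] (· ++ [p.1]))
        (PySem.Dict.empty : PySem.Dict String (List Int)))
      = (((PySem.List.enumerate choices 0).map (fun p => (pvDisp p.2, p.1))).foldl
          (fun g q => g.modify q.1 [] (· ++ [q.2])) PySem.Dict.empty) from
    (List.foldl_map (f := fun p : Int × List (String × String) => (pvDisp p.2, p.1))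
      (g := fun (g : PySem.Dict String (List Int)) q => g.modify q.1 [] (· ++ [q.2]))
      (l := PySem.List.enumerate choices 0) (init := PySem.Dict.empty)).symm]
  rw [PySem.Dict.getD_foldl_modify_append]
  simp [pvI]

lemma pvGroups_items (choices : List (List (String × String))) :
    ((PySem.List.enumerate choices 0).foldl
        (fun g p => g.modify (pvDisp p.2) [] (· ++ [p.1]))
        (PySem.Dict.empty : PySem.Dict String (List Int))).items
      = (PySem.Set.ofList (choices.map pvDisp)).map (fun d => (d, pvI choices d)) := by
  set G := ((PySem.List.enumerate choices 0).foldl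
        (fun g p => g.modify (pvDisp p.2) [] (· ++ [p.1]))
        (PySem.Dict.empty : PySem.Dict String (List Int))) with hG
  have hnd : G.keys.Nodup := by
    rw [hG]
    exact PySem.Dict.nodup_keys_foldl_modify_key (PySem.List.enumerate choices 0)
      (fun p : Int × List (String × String) => pvDisp p.2) []
      (fun g p => (· ++ [p.1])) PySem.Dict.empty PySem.Dict.nodup_keys_empty
  have hkeys : G.keys = PySem.Set.ofList (choices.map pvDisp) := by
    rw [hG, PySem.Dict.keys_foldl_modify_key
      (key := fun p : Int × List (String × String) => pvDisp p.2)
      (f := fun g p => (· ++ [p.1]))]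
    have : (PySem.List.enumerate choices 0).map (fun p => pvDisp p.2) = choices.map pvDisp := by
      rw [show choices = (PySem.List.enumerate choices 0).map (·.2) from
        (PySem.List.map_snd_enumerate choices 0).symm, List.map_map]
      simp
    rw [this]
    simp [PySem.Set.update, PySem.Set.ofList_eq_foldl, PySem.Dict.keys_empty]
  rw [PySem.Dict.items_eq_map_keys G hnd [], hkeys]
  exact List.map_congr_left (fun d _ => by rw [pvGroups_getD])

lemma pvMem_pvI (choices : List (List (String × String))) (d : String) (i : Int) :
    i ∈ pvI choices d ↔ ∃ (k : Nat) (h : k < choices.length), i = (k : Int) ∧ pvDisp choices[k] = d := by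
  simp [pvI, List.mem_filter, PySem.List.mem_enumerate_iff]
  aesop

lemma pvI_nonneg (choices : List (List (String × String))) (d : String) :
    ∀ i ∈ pvI choices d, 0 ≤ i := by
  intro i hi
  obtain ⟨k, hk, rfl, -⟩ := (pvMem_pvI choices d i).mp hi
  positivity

lemma pvI_length (choices : List (List (String × String))) (d : String) :
    (pvI choices d).length = (choices.map pvDisp).count d := by
  rw [pvI, List.length_map, ← List.countP_eq_length_filter, List.countP_map,
    List.count_eq_countP, List.countP_map]
  conv_rhs => rw [show choices = (PySem.List.enumerate choices 0).map (·.2) from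
      (PySem.List.map_snd_enumerate choices 0).symm, List.countP_map]
  rfl

lemma pvI_split (choices : List (List (String × String))) (j : Nat) (hj : j < choices.length) :
    ∃ suf, pvI choices (pvDisp choices[j])
        = pvI (choices.take j) (pvDisp choices[j]) ++ (j : Int) :: suf
      ∧ ∀ i ∈ suf, (j : Int) < i := by
  have hsplit : choices = choices.take j ++ choices[j] :: choices.drop (j + 1) := by
    conv_lhs => rw [← List.take_append_drop j choices]
    rw [List.drop_eq_getElem_cons hj]
  set d := pvDisp choices[j] with hd
  refine ⟨(((PySem.List.enumerate (choices.drop (j + 1)) ((j : Int) + 1)).map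
      (fun p => (pvDisp p.2, p.1))).filter (fun q => q.1 == d)).map (·.2), ?_, ?_⟩
  · conv_lhs => rw [pvI, hsplit]
    rw [PySem.List.enumerate_append, PySem.List.enumerate_cons]
    have hlt : (choices.take j).length = j := by simp [List.length_take]; omega
    rw [List.map_append, List.filter_append, List.map_append]
    congr 1
    simp only [hlt, List.map_cons, List.filter_cons]
    simp [hd]
  · intro i hi
    simp only [List.mem_map, List.mem_filter, PySem.List.mem_enumerate_iff] at hi
    obtain ⟨q, ⟨⟨p, ⟨k, hk, rfl⟩, rfl⟩, -⟩, rfl⟩ := hi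
    simp
    omega

lemma pvRenameFold_length (name : String) :
    ∀ (ps : List (Int × Int)) (cs : List (List (String × String))),
      (ps.foldl (pvRenameStep name) cs).length = cs.length := by
  intro ps
  induction ps with
  | nil => intro cs; rfl
  | cons p t ih => intro cs; rw [List.foldl_cons, ih]; simp [pvRenameStep, PySem.List.length_pySetD]

lemma pvRenameFold_ne (name : String) (j : Nat) :
    ∀ (ps : List (Int × Int)) (cs : List (List (String × String))),
      (∀ p ∈ ps, 0 ≤ p.2) → (∀ p ∈ ps, p.2 ≠ (j : Int)) →
      (ps.foldl (pvRenameStep name) cs)[j]? = cs[j]? := by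
  intro ps
  induction ps with
  | nil => intro cs _ _; rfl
  | cons p t ih =>
      intro cs h0 hne
      rw [List.foldl_cons, ih _ (fun q hq => h0 q (List.mem_cons_of_mem _ hq))
        (fun q hq => hne q (List.mem_cons_of_mem _ hq))]
      have hp0 : 0 ≤ p.2 := h0 p List.mem_cons_self
      have hpj : p.2.toNat ≠ j := by
        intro h; exact hne p List.mem_cons_self (by omega)
      rw [pvRenameStep, PySem.List.pySetD_of_nonneg _ _ hp0, List.getElem?_set_ne hpj]

lemma pvEnum_snd_mem : ∀ (idxs : List Int) (s' : Int) (p : Int × Int),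
    p ∈ PySem.List.enumerate idxs s' → p.2 ∈ idxs := by
  intro idxs s' p hp
  obtain ⟨k, hk, rfl⟩ := (PySem.List.mem_enumerate_iff _ _ _).mp hp
  exact List.getElem_mem hk

lemma pvRenameFold_self (name : String) (s : Int) (pre suf : List Int) (j : Nat)
    (cs : List (List (String × String)))
    (hpre0 : ∀ i ∈ pre, 0 ≤ i) (hsuf0 : ∀ i ∈ suf, 0 ≤ i)
    (hprene : (j : Int) ∉ pre) (hsufne : (j : Int) ∉ suf) (hj : j < cs.length) :
    ((PySem.List.enumerate (pre ++ (j : Int) :: suf) s).foldl (pvRenameStep name) cs)[j]?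
      = some (pvRename name (s + pre.length) (cs.getD j [])) := by
  rw [PySem.List.enumerate_append, List.foldl_append, PySem.List.enumerate_cons, List.foldl_cons]
  set cs1 := (PySem.List.enumerate pre s).foldl (pvRenameStep name) cs with hcs1
  have h1 : cs1[j]? = cs[j]? :=
    pvRenameFold_ne name j _ cs (fun p hp => hpre0 _ (pvEnum_snd_mem _ _ _ hp))
      (fun p hp h => hprene (h ▸ pvEnum_snd_mem _ _ _ hp))
  have hlen1 : cs1.length = cs.length := pvRenameFold_length name _ cs
  have hstep : pvRenameStep name cs1 (s + pre.length, (j : Int))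
      = cs1.set j (pvRename name (s + pre.length) (cs.getD j [])) := by
    rw [pvRenameStep, PySem.List.pySetD_of_nonneg _ _ (by positivity)]
    have : PySem.List.pyGetD cs1 (j : Int) [] = cs.getD j [] := by
      rw [PySem.List.pyGetD_natCast, List.getD_eq_getElem?_getD, h1, ← List.getD_eq_getElem?_getD]
    simp [this, pvRename]
  rw [hstep, pvRenameFold_ne name j _ _ (fun p hp => hsuf0 _ (pvEnum_snd_mem _ _ _ hp))
      (fun p hp h => hsufne (h ▸ pvEnum_snd_mem _ _ _ hp)),
    List.getElem?_set_self (by rw [hlen1]; exact hj)]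

lemma pvApplyFold_length :
    ∀ (M : List (String × List Int)) (cs : List (List (String × String))),
      (M.foldl pvApplyGroup cs).length = cs.length := by
  intro M
  induction M with
  | nil => intro cs; rfl
  | cons g t ih =>
      intro cs
      rw [List.foldl_cons, ih, pvApplyGroup]
      split
      · exact pvRenameFold_length g.1 _ cs
      · rfl

lemma pvApplyFold_ne (j : Nat) :
    ∀ (M : List (String × List Int)) (cs : List (List (String × String))),
      (∀ g ∈ M, ∀ i ∈ g.2, 0 ≤ i) → (∀ g ∈ M, (j : Int) ∉ g.2) →
      (M.foldl pvApplyGroup cs)[j]? = cs[j]? := by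
  intro M
  induction M with
  | nil => intro cs _ _; rfl
  | cons g t ih =>
      intro cs h0 hne
      rw [List.foldl_cons, ih _ (fun q hq => h0 q (List.mem_cons_of_mem _ hq))
        (fun q hq => hne q (List.mem_cons_of_mem _ hq)), pvApplyGroup]
      split
      · exact pvRenameFold_ne g.1 j _ cs
          (fun p hp => h0 g List.mem_cons_self _ (pvEnum_snd_mem _ _ _ hp))
          (fun p hp h => hne g List.mem_cons_self (h ▸ pvEnum_snd_mem _ _ _ hp))
      · rfl

-- the positions of a different display never include j
lemma pvNotMem_pvI (choices : List (List (String × String))) (j : Nat) (hj : j < choices.length)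
    (d : String) (hne : d ≠ pvDisp choices[j]) : (j : Int) ∉ pvI choices d := by
  intro hmem
  obtain ⟨k, hk, hkj, hd⟩ := (pvMem_pvI choices d _).mp hmem
  have : k = j := by omega
  subst this
  exact hne hd.symm

lemma pvAlt_getElem (choices : List (List (String × String))) (j : Nat) (hj : j < choices.length) :
    (dedupe_choice_displays_py_alt choices)[j]?
      = some (pvRender (choices.map pvDisp) j choices[j]) := by
  have halt : dedupe_choice_displays_py_alt choices
      = (((PySem.List.enumerate choices 0).foldl
          (fun g p => g.modify (pvDisp p.2) [] (· ++ [p.1]))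
          (PySem.Dict.empty : PySem.Dict String (List Int))).items).foldl pvApplyGroup choices := rfl
  rw [halt, pvGroups_items]
  set displays := choices.map pvDisp with hdisp
  set dj := pvDisp choices[j] with hdj
  have hdj_mem : dj ∈ PySem.Set.ofList displays := by
    rw [PySem.Set.mem_ofList, hdisp]
    exact List.mem_map_of_mem (List.getElem_mem hj)
  obtain ⟨P, S, hPS⟩ := List.mem_iff_append.mp hdj_mem
  have hnd : (P ++ dj :: S).Nodup := hPS ▸ PySem.Set.nodup_ofList displays
  have hdjP : dj ∉ P := by
    intro h
    exact (List.disjoint_of_nodup_append hnd) h List.mem_cons_self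
  have hdjS : dj ∉ S := (List.nodup_cons.mp hnd.of_append_right).1
  rw [hPS, List.map_append, List.map_cons, List.foldl_append, List.foldl_cons]
  set cs1 := (P.map (fun d => (d, pvI choices d))).foldl pvApplyGroup choices with hcs1
  have hP0 : ∀ g ∈ P.map (fun d => (d, pvI choices d)), ∀ i ∈ g.2, 0 ≤ i := by
    rintro g hg i hi
    obtain ⟨d, -, rfl⟩ := List.mem_map.mp hg
    exact pvI_nonneg choices d i hi
  have hPne : ∀ g ∈ P.map (fun d => (d, pvI choices d)), (j : Int) ∉ g.2 := by
    rintro g hg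
    obtain ⟨d, hd, rfl⟩ := List.mem_map.mp hg
    exact pvNotMem_pvI choices j hj d (fun h => hdjP (by rw [h, ← hdj] at hd; exact hd))
  have h1 : cs1[j]? = choices[j]? := pvApplyFold_ne j _ choices hP0 hPne
  have hlen1 : cs1.length = choices.length := pvApplyFold_length _ choices
  have hS0 : ∀ g ∈ S.map (fun d => (d, pvI choices d)), ∀ i ∈ g.2, 0 ≤ i := by
    rintro g hg i hi
    obtain ⟨d, -, rfl⟩ := List.mem_map.mp hg
    exact pvI_nonneg choices d i hi
  have hSne : ∀ g ∈ S.map (fun d => (d, pvI choices d)), (j : Int) ∉ g.2 := by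
    rintro g hg
    obtain ⟨d, hd, rfl⟩ := List.mem_map.mp hg
    exact pvNotMem_pvI choices j hj d (fun h => hdjS (by rw [h, ← hdj] at hd; exact hd))
  rw [pvApplyFold_ne j _ _ hS0 hSne]
  by_cases hdup : 1 < (pvI choices dj).length
  · -- duplicated name: the group pass renames position j
    rw [pvApplyGroup, if_pos (by simpa using hdup)]
    obtain ⟨suf, hsp, hsuf⟩ := pvI_split choices j hj
    have hpre_lt : ∀ i ∈ pvI (choices.take j) dj, i < (j : Int) := by
      intro i hi
      obtain ⟨k, hk, rfl, -⟩ := (pvMem_pvI _ dj i).mp hi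
      have : k < j := by
        have := hk
        simp [List.length_take] at this
        omega
      exact_mod_cast this
    rw [show (dj, pvI choices dj).2 = pvI choices dj from rfl, hsp,
      pvRenameFold_self dj 1 _ suf j cs1
        (pvI_nonneg _ dj) (fun i hi => le_of_lt (lt_of_le_of_lt (by positivity) (hsuf i hi)))
        (fun h => absurd (hpre_lt _ h) (by omega)) (fun h => absurd (hsuf _ h) (by omega))
        (by rw [hlen1]; exact hj)]
    have hval : cs1.getD j [] = choices[j] := by
      rw [List.getD_eq_getElem?_getD, h1, List.getElem?_eq_getElem hj]
      rfl
    have hcount : 1 < displays.count dj := by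
      rw [← pvI_length choices dj]; exact hdup
    have hlen_pre : ((pvI (choices.take j) dj).length : Int)
        = ((displays.take j).count dj : Int) := by
      rw [pvI_length, hdisp, List.map_take]
    rw [hval, pvRender]
    simp only [← hdj, if_pos hcount]
    rw [hlen_pre, Int.add_comm]
  · -- unique name: the group pass skips, position j keeps its choice
    rw [pvApplyGroup, if_neg (by simpa using hdup), h1, List.getElem?_eq_getElem hj]
    have hcount : ¬ 1 < displays.count dj := by
      rw [← pvI_length choices dj]; exact hdup
    rw [pvRender]
    simp only [← hdj, if_neg hcount]

lemma pvAlt_eq (choices : List (List (String × String))) :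
    dedupe_choice_displays_py_alt choices = pvSpecGo (choices.map pvDisp) 0 choices := by
  rw [← pvMapIdx_render (choices.map pvDisp) 0 choices]
  apply List.ext_getElem?
  intro j
  rw [List.getElem?_mapIdx]
  by_cases hj : j < choices.length
  · rw [pvAlt_getElem choices j hj, List.getElem?_eq_getElem hj]
    simp
  · have hlen : (dedupe_choice_displays_py_alt choices).length = choices.length := by
      have halt : dedupe_choice_displays_py_alt choices
          = (((PySem.List.enumerate choices 0).foldl
              (fun g p => g.modify (pvDisp p.2) [] (· ++ [p.1]))
              (PySem.Dict.empty : PySem.Dict String (List Int))).items).foldl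
            pvApplyGroup choices := rfl
      rw [halt, pvApplyFold_length]
    rw [List.getElem?_eq_none (l := choices) (by omega),
      List.getElem?_eq_none (l := dedupe_choice_displays_py_alt choices) (by omega)]
    rfl

-- ===== VERDICT (by name: the statement is the Claim_ definition above) =====
theorem dedupe_choice_displays_py_spec : Claim_equal_dedupe_choice_displays_py := by
  intro choices _hdom _hpre
  unfold Spec_dedupe_choice_displays_py
  rw [pvA_eq, pvAlt_eq]
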